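-- pv_equiv track=rewrite | github.com/Greg-Aster/MegaMeal | src/game/tools/extract_nature.py | categorize_object
-- ===== SOURCE A (Python) =====
-- def categorize_object(obj_name):
--     """Categorize objects based on naming patterns"""
--     name_lower = obj_name.lower()
--
--     if any(keyword in name_lower for keyword in ['tree', 'pine', 'fir', 'oak', 'trunk', 'branch']):
--         return 'trees'
--     elif any(keyword in name_lower for keyword in ['rock', 'stone', 'boulder', 'cliff']):
--         return 'rocks'
--     elif any(keyword in name_lower for keyword in ['grass', 'fern', 'bush', 'plant', 'flower', 'leaf']):
--         return 'vegetation'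
--     elif any(keyword in name_lower for keyword in ['log', 'stump', 'mushroom', 'debris']):
--         return 'decorative'
--     else:
--         return 'vegetation'  # Default for nature assets
-- ===== SOURCE B (Python) =====
-- _KEYWORD_RANK = {
--     'tree': 0, 'pine': 0, 'fir': 0, 'oak': 0, 'trunk': 0, 'branch': 0,
--     'rock': 1, 'stone': 1, 'boulder': 1, 'cliff': 1,
--     'grass': 2, 'fern': 2, 'bush': 2, 'plant': 2, 'flower': 2, 'leaf': 2,
--     'log': 3, 'stump': 3, 'mushroom': 3, 'debris': 3,
-- }
-- _NAMES = ('trees', 'rocks', 'vegetation', 'decorative', 'vegetation')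
--
-- def categorize_object(obj_name):
--     """Categorize objects: one left-to-right scan of the name, keeping the
--     best (lowest) category rank of any keyword starting at each position."""
--     s = obj_name.lower()
--     best = 4
--     for i in range(len(s)):
--         for kw, rank in _KEYWORD_RANK.items():
--             if s.startswith(kw, i):
--                 best = min(best, rank)
--     return _NAMES[best]
-- ===== Notes on version B (the rewrite author's own statement) =====
-- stated objective: alternative
-- what changed: Instead of testing category keyword lists in order with substring membership and early return, B makes a single left-to-right scan over the positions of the lowered name, checking a flat keyword->rank map with startswith at each position and keeping the minimum matched rank, then maps the rank to its category name.
import Mathlib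
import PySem

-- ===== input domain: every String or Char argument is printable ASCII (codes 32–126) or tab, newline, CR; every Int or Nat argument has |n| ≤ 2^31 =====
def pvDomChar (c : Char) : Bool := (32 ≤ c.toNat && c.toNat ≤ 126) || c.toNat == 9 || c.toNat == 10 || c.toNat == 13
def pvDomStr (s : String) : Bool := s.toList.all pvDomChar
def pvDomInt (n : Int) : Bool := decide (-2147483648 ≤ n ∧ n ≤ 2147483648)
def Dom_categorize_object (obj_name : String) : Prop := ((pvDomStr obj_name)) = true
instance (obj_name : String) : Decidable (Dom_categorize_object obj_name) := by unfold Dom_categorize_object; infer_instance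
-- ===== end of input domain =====

-- B scans the name's positions once with a flat keyword->rank map and a min-rank accumulator
-- instead of A's ordered per-category substring tests with early return (alternative, same cost).


-- ===== PORT A =====
def categorize_object (obj_name : String) : String :=
  let name_lower := PySem.Str.lower obj_name
  if ["tree", "pine", "fir", "oak", "trunk", "branch"].any (fun keyword => PySem.Str.isIn keyword name_lower) then
    "trees"
  else if ["rock", "stone", "boulder", "cliff"].any (fun keyword => PySem.Str.isIn keyword name_lower) then
    "rocks"
  else if ["grass", "fern", "bush", "plant", "flower", "leaf"].any (fun keyword => PySem.Str.isIn keyword name_lower) then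
    "vegetation"
  else if ["log", "stump", "mushroom", "debris"].any (fun keyword => PySem.Str.isIn keyword name_lower) then
    "decorative"
  else
    "vegetation"

-- ===== PORT B =====
-- flat keyword -> category-rank map (a dict iterated in insertion order; only iterated, so a plain list of pairs)
def pvKwRank : List (String × Nat) :=
  [("tree", 0), ("pine", 0), ("fir", 0), ("oak", 0), ("trunk", 0), ("branch", 0),
   ("rock", 1), ("stone", 1), ("boulder", 1), ("cliff", 1),
   ("grass", 2), ("fern", 2), ("bush", 2), ("plant", 2), ("flower", 2), ("leaf", 2),
   ("log", 3), ("stump", 3), ("mushroom", 3), ("debris", 3)]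

def pvNames : List String := ["trees", "rocks", "vegetation", "decorative", "vegetation"]

-- Python's s.startswith(kw, i) with 0 ≤ i ≤ len(s) is exactly: kw is a prefix of s[i:].
def categorize_object_alt (obj_name : String) : String :=
  let s := PySem.Str.lower obj_name
  let best := (List.range s.toList.length).foldl
    (fun best i => pvKwRank.foldl
      (fun best p =>
        if PySem.Chars.startswith (s.toList.drop i) p.1.toList then min best p.2 else best)
      best) 4
  pvNames.getD best "vegetation"

-- ===== PRECONDITION & SPEC =====
def Spec_categorize_object (obj_name : String) (out : String) : Prop := out = categorize_object_alt obj_name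
instance (obj_name : String) (out : String) : Decidable (Spec_categorize_object obj_name out) := by unfold Spec_categorize_object; infer_instance

-- ===== CLAIM (what is proved, stated in full; the proofs are below) =====
def Claim_equal_categorize_object : Prop := ∀ (obj_name : String), Dom_categorize_object obj_name → Spec_categorize_object obj_name (categorize_object obj_name)

-- ===== LEMMAS AND PROOFS =====

-- a fold whose step satisfies 'step b x ≤ k ↔ b ≤ k ∨ Q x k' has result ≤ k iff the seed is or some element is
theorem pv_foldl_le_iff {α : Type} (step : Nat → α → Nat) (Q : α → Nat → Prop)
    (h : ∀ b x k, step b x ≤ k ↔ b ≤ k ∨ Q x k) (l : List α) (b k : Nat) :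
    l.foldl step b ≤ k ↔ b ≤ k ∨ ∃ x ∈ l, Q x k := by
  induction l generalizing b with
  | nil => simp
  | cons x t ih =>
    simp only [List.foldl_cons, ih, h, List.mem_cons]
    constructor
    · rintro ((hb | hq) | ⟨y, hy, hQ⟩)
      · exact Or.inl hb
      · exact Or.inr ⟨x, Or.inl rfl, hq⟩
      · exact Or.inr ⟨y, Or.inr hy, hQ⟩
    · rintro (hb | ⟨y, (rfl | hy), hQ⟩)
      · exact Or.inl (Or.inl hb)
      · exact Or.inl (Or.inr hQ)
      · exact Or.inr ⟨y, hy, hQ⟩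

-- the inner fold's step: match at position i lowers the bound to the keyword's rank
theorem pv_inner_le_iff (cs : List Char) (i b k : Nat) :
    (pvKwRank.foldl
      (fun best p =>
        if PySem.Chars.startswith (cs.drop i) p.1.toList then min best p.2 else best) b) ≤ k
    ↔ b ≤ k ∨ ∃ p ∈ pvKwRank, PySem.Chars.startswith (cs.drop i) p.1.toList = true ∧ p.2 ≤ k := by
  refine pv_foldl_le_iff (α := String × Nat)
    (fun best p => if PySem.Chars.startswith (cs.drop i) p.1.toList then min best p.2 else best)
    (fun p k => PySem.Chars.startswith (cs.drop i) p.1.toList = true ∧ p.2 ≤ k) ?_ pvKwRank b k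
  intro b p k
  by_cases hp : PySem.Chars.startswith (cs.drop i) p.1.toList = true
  · simp [hp]
  · simp [hp]

-- the whole nested fold
theorem pv_best_le_iff (cs : List Char) (k : Nat) :
    ((List.range cs.length).foldl
      (fun best i => pvKwRank.foldl
        (fun best p =>
          if PySem.Chars.startswith (cs.drop i) p.1.toList then min best p.2 else best)
        best) 4) ≤ k
    ↔ 4 ≤ k ∨ ∃ i ∈ List.range cs.length, ∃ p ∈ pvKwRank,
        PySem.Chars.startswith (cs.drop i) p.1.toList = true ∧ p.2 ≤ k := by
  refine pv_foldl_le_iff _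
    (fun i k => ∃ p ∈ pvKwRank, PySem.Chars.startswith (cs.drop i) p.1.toList = true ∧ p.2 ≤ k) ?_ _ 4 k
  intro b i k
  exact pv_inner_le_iff cs i b k

-- a nonempty keyword starts at some position of cs iff it is a substring of cs
theorem pv_exists_startswith_iff_isIn (cs sub : List Char) (hsub : sub ≠ []) :
    (∃ i ∈ List.range cs.length, PySem.Chars.startswith (cs.drop i) sub = true)
    ↔ PySem.Chars.isIn sub cs = true := by
  rw [← PySem.Chars.exists_prefix_drop_iff_isIn]
  constructor
  · rintro ⟨i, _, hsw⟩
    exact ⟨i, (PySem.Chars.startswith_iff _ _).1 hsw⟩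
  · rintro ⟨j, hpre⟩
    by_cases hj : j < cs.length
    · exact ⟨j, List.mem_range.2 hj, (PySem.Chars.startswith_iff _ _).2 hpre⟩
    · exfalso
      rw [List.drop_eq_nil_of_le (le_of_not_gt hj)] at hpre
      exact hsub (List.prefix_nil.1 hpre)

-- Str.isIn in A's port and Chars.isIn used by the proof coincide
theorem pv_str_isIn_iff (sub s : String) :
    PySem.Str.isIn sub s = true ↔ PySem.Chars.isIn sub.toList s.toList = true := by
  rw [PySem.Str.isIn_iff_infix, PySem.Chars.isIn_iff_infix]

-- every keyword in the table is nonempty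
theorem pv_kw_ne_nil : ∀ p ∈ pvKwRank, p.1.toList ≠ [] := by decide

-- matched-rank characterisation, per threshold, in terms of substring membership
theorem pv_M_iff (s : String) (k : Nat) :
    (∃ i ∈ List.range s.toList.length, ∃ p ∈ pvKwRank,
        PySem.Chars.startswith (s.toList.drop i) p.1.toList = true ∧ p.2 ≤ k)
    ↔ ∃ p ∈ pvKwRank, p.2 ≤ k ∧ PySem.Str.isIn p.1 s = true := by
  constructor
  · rintro ⟨i, hi, p, hp, hsw, hk⟩
    refine ⟨p, hp, hk, ?_⟩
    rw [pv_str_isIn_iff]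
    rw [← pv_exists_startswith_iff_isIn s.toList p.1.toList (pv_kw_ne_nil p hp)]
    exact ⟨i, hi, hsw⟩
  · rintro ⟨p, hp, hk, hin⟩
    rw [pv_str_isIn_iff] at hin
    rw [← pv_exists_startswith_iff_isIn s.toList p.1.toList (pv_kw_ne_nil p hp)] at hin
    obtain ⟨i, hi, hsw⟩ := hin
    exact ⟨i, hi, p, hp, hsw, hk⟩

-- ===== VERDICT (by name: the statement is the Claim_ definition above) =====
theorem categorize_object_spec : Claim_equal_categorize_object := by
  intro obj_name _
  unfold Spec_categorize_object categorize_object categorize_object_alt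
  dsimp only
  set s := PySem.Str.lower obj_name with hs
  set best := (List.range s.toList.length).foldl
    (fun best i => pvKwRank.foldl
      (fun best p =>
        if PySem.Chars.startswith (s.toList.drop i) p.1.toList then min best p.2 else best)
      best) 4 with hbest
  have hle : ∀ k, best ≤ k ↔ 4 ≤ k ∨ ∃ p ∈ pvKwRank, p.2 ≤ k ∧ PySem.Str.isIn p.1 s = true := by
    intro k
    rw [hbest, pv_best_le_iff]
    constructor
    · rintro (h4 | h); exacts [Or.inl h4, Or.inr ((pv_M_iff s k).1 h)]
    · rintro (h4 | h); exacts [Or.inl h4, Or.inr ((pv_M_iff s k).2 h)]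
  -- rewrite the rank conditions as A's four boolean 'any' tests
  have h4 : best ≤ 4 := by rw [hle]; exact Or.inl le_rfl
  have e0 : (∃ p ∈ pvKwRank, p.2 ≤ 0 ∧ PySem.Str.isIn p.1 s = true)
      ↔ (["tree", "pine", "fir", "oak", "trunk", "branch"].any (fun keyword => PySem.Str.isIn keyword s) = true) := by
    simp [pvKwRank]
  have e1 : (∃ p ∈ pvKwRank, p.2 ≤ 1 ∧ PySem.Str.isIn p.1 s = true)
      ↔ (["tree", "pine", "fir", "oak", "trunk", "branch", "rock", "stone", "boulder", "cliff"].any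
          (fun keyword => PySem.Str.isIn keyword s) = true) := by
    simp [pvKwRank]
  have e2 : (∃ p ∈ pvKwRank, p.2 ≤ 2 ∧ PySem.Str.isIn p.1 s = true)
      ↔ (["tree", "pine", "fir", "oak", "trunk", "branch", "rock", "stone", "boulder", "cliff",
          "grass", "fern", "bush", "plant", "flower", "leaf"].any
          (fun keyword => PySem.Str.isIn keyword s) = true) := by
    simp [pvKwRank]
  have e3 : (∃ p ∈ pvKwRank, p.2 ≤ 3 ∧ PySem.Str.isIn p.1 s = true)
      ↔ (["tree", "pine", "fir", "oak", "trunk", "branch", "rock", "stone", "boulder", "cliff",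
          "grass", "fern", "bush", "plant", "flower", "leaf", "log", "stump", "mushroom", "debris"].any
          (fun keyword => PySem.Str.isIn keyword s) = true) := by
    simp [pvKwRank]
  -- the longer keyword lists are the concatenations of A's four lists
  have s1 : (["tree", "pine", "fir", "oak", "trunk", "branch", "rock", "stone", "boulder", "cliff"].any
        (fun keyword => PySem.Str.isIn keyword s))
      = (["tree", "pine", "fir", "oak", "trunk", "branch"].any (fun keyword => PySem.Str.isIn keyword s)
        || ["rock", "stone", "boulder", "cliff"].any (fun keyword => PySem.Str.isIn keyword s)) := by
    rw [show (["tree", "pine", "fir", "oak", "trunk", "branch", "rock", "stone", "boulder", "cliff"] : List String)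
        = ["tree", "pine", "fir", "oak", "trunk", "branch"] ++ ["rock", "stone", "boulder", "cliff"] from rfl,
      List.any_append]
  have s2 : (["tree", "pine", "fir", "oak", "trunk", "branch", "rock", "stone", "boulder", "cliff",
        "grass", "fern", "bush", "plant", "flower", "leaf"].any (fun keyword => PySem.Str.isIn keyword s))
      = (["tree", "pine", "fir", "oak", "trunk", "branch", "rock", "stone", "boulder", "cliff"].any
          (fun keyword => PySem.Str.isIn keyword s)
        || ["grass", "fern", "bush", "plant", "flower", "leaf"].any (fun keyword => PySem.Str.isIn keyword s)) := by
    rw [show (["tree", "pine", "fir", "oak", "trunk", "branch", "rock", "stone", "boulder", "cliff",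
        "grass", "fern", "bush", "plant", "flower", "leaf"] : List String)
        = ["tree", "pine", "fir", "oak", "trunk", "branch", "rock", "stone", "boulder", "cliff"]
          ++ ["grass", "fern", "bush", "plant", "flower", "leaf"] from rfl,
      List.any_append]
  have s3 : (["tree", "pine", "fir", "oak", "trunk", "branch", "rock", "stone", "boulder", "cliff",
        "grass", "fern", "bush", "plant", "flower", "leaf", "log", "stump", "mushroom", "debris"].any
        (fun keyword => PySem.Str.isIn keyword s))
      = (["tree", "pine", "fir", "oak", "trunk", "branch", "rock", "stone", "boulder", "cliff",
          "grass", "fern", "bush", "plant", "flower", "leaf"].any (fun keyword => PySem.Str.isIn keyword s)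
        || ["log", "stump", "mushroom", "debris"].any (fun keyword => PySem.Str.isIn keyword s)) := by
    rw [show (["tree", "pine", "fir", "oak", "trunk", "branch", "rock", "stone", "boulder", "cliff",
        "grass", "fern", "bush", "plant", "flower", "leaf", "log", "stump", "mushroom", "debris"] : List String)
        = ["tree", "pine", "fir", "oak", "trunk", "branch", "rock", "stone", "boulder", "cliff",
          "grass", "fern", "bush", "plant", "flower", "leaf"] ++ ["log", "stump", "mushroom", "debris"] from rfl,
      List.any_append]
  by_cases ht : (["tree", "pine", "fir", "oak", "trunk", "branch"].any (fun keyword => PySem.Str.isIn keyword s) = true)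
  · have hb : best = 0 := Nat.le_zero.1 ((hle 0).2 (Or.inr (e0.2 ht)))
    rw [if_pos ht, hb]; rfl
  · rw [if_neg ht]
    have hb0 : ¬ best ≤ 0 := fun h => by
      rcases (hle 0).1 h with h' | h'
      · omega
      · exact ht (e0.1 h')
    by_cases hr : (["rock", "stone", "boulder", "cliff"].any (fun keyword => PySem.Str.isIn keyword s) = true)
    · have hb : best ≤ 1 := (hle 1).2 (Or.inr (e1.2 (by rw [s1, hr]; simp)))
      have hb' : best = 1 := by omega
      rw [if_pos hr, hb']; rfl
    · rw [if_neg hr]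
      have hb1 : ¬ best ≤ 1 := fun h => by
        rcases (hle 1).1 h with h' | h'
        · omega
        · rw [e1, s1, Bool.or_eq_true] at h'
          rcases h' with h'' | h'' <;> [exact ht h''; exact hr h'']
      by_cases hv : (["grass", "fern", "bush", "plant", "flower", "leaf"].any (fun keyword => PySem.Str.isIn keyword s) = true)
      · have hb : best ≤ 2 := (hle 2).2 (Or.inr (e2.2 (by rw [s2, hv]; simp)))
        have hb' : best = 2 := by omega
        rw [if_pos hv, hb']; rfl
      · rw [if_neg hv]
        have hb2 : ¬ best ≤ 2 := fun h => by
          rcases (hle 2).1 h with h' | h'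
          · omega
          · rw [e2, s2, Bool.or_eq_true, s1, Bool.or_eq_true] at h'
            rcases h' with (h3 | h3) | h3 <;> [exact ht h3; exact hr h3; exact hv h3]
        by_cases hd : (["log", "stump", "mushroom", "debris"].any (fun keyword => PySem.Str.isIn keyword s) = true)
        · have hb : best ≤ 3 := (hle 3).2 (Or.inr (e3.2 (by rw [s3, hd]; simp)))
          have hb' : best = 3 := by omega
          rw [if_pos hd, hb']; rfl
        · rw [if_neg hd]
          have hb3 : ¬ best ≤ 3 := fun h => by
            rcases (hle 3).1 h with h' | h'
            · omega
            · rw [e3, s3, Bool.or_eq_true, s2, Bool.or_eq_true, s1, Bool.or_eq_true] at h'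
              rcases h' with ((h3 | h3) | h3) | h3 <;> [exact ht h3; exact hr h3; exact hv h3; exact hd h3]
          have hb' : best = 4 := by omega
          rw [hb']; rfl
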